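-- pv_equiv track=rewrite | github.com/kaiwensun/leetcode | 1501-2000/1981.Minimize the Difference Between Target and Chosen Elements.py | minimizeTheDifference
-- ===== SOURCE A (Python) =====
-- from typing import List
--
-- from functools import cache
--
-- def minimizeTheDifference(mat: List[List[int]], target: int) -> int:
--     @cache
--     def dp(i, sm):
--         if i == len(mat):
--             return abs(sm - target)
--         res = float("inf")
--         for num in mat[i]:
--             res = min(res, dp(i + 1, sm + num))
--             if res == 0:
--                 break
--         return res
--     mat = list(map(set, mat))
--     res = dp(0, 0)
--     dp.cache_clear()
--     return res
-- ===== SOURCE B (Python) =====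
-- def minimizeTheDifference(mat, target):
--     sums = {0}
--     for row in mat:
--         sums = {s + x for s in sums for x in set(row)}
--     return min(abs(s - target) for s in sums)
-- ===== Notes on version B (the rewrite author's own statement) =====
-- stated objective: alternative
-- what changed: Replaces the memoized top-down recursion over (row index, partial sum) with an iterative layer-by-layer set of reachable sums, taking min |s-target| over the final set.
-- outside the precondition, e.g. on minimizeTheDifference([[]], 0): A returns inf, B raises ValueError
import Mathlib
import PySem

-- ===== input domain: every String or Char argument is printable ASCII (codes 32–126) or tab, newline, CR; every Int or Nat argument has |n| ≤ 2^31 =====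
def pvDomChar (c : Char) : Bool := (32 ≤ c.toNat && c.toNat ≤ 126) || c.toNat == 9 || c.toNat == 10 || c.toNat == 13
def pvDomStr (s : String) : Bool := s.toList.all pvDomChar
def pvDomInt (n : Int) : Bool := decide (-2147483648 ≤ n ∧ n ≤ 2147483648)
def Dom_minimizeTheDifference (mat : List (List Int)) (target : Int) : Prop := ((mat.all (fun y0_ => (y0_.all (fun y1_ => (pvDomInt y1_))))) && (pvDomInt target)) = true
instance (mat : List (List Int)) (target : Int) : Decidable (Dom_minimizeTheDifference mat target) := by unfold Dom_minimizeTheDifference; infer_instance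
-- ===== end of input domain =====

-- B replaces A's memoized recursion by an iterative reachable-sum set; equal return value on matrices with no empty row.


-- ===== PORT A =====
-- Python's float('inf') accumulator is modelled by Option Int: none = inf.
def optMin : Option Int → Option Int → Option Int
  | none, v => v
  | some a, none => some a
  | some a, some b => some (min a b)

-- dp(i, sm): recursion over the remaining rows; the `if res = some 0` branch is the `break`
-- (once res == 0 the remaining iterations are skipped; keeping res unchanged computes the same value).
def dpA (target : Int) : List (List Int) → Int → Option Int
  | [], sm => some |sm - target|
  | row :: rest, sm =>
      row.foldl (fun res num =>
        if res = some 0 then res else optMin res (dpA target rest (sm + num))) none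

-- mat = list(map(set, mat)); dp(0, 0); result is an int only when dp does not stay at inf.
def minimizeTheDifference (mat : List (List Int)) (target : Int) : Int :=
  (dpA target (mat.map (fun r => PySem.Set.ofList r)) 0).getD 0

-- ===== PORT B =====
def minimizeTheDifference_alt (mat : List (List Int)) (target : Int) : Int :=
  let sums := mat.foldl
    (fun sums row =>
      PySem.Set.ofList (sums.flatMap (fun s => (PySem.Set.ofList row).map (fun x => s + x))))
    (PySem.Set.ofList [0])
  match PySem.List.min? (sums.map (fun s => |s - target|)) (fun y => y) with
  | some m => m
  | none => 0

-- ===== PRECONDITION & SPEC =====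
-- Pre_ excludes matrices containing an empty row: there A returns float('inf'), not an int,
-- and B raises ValueError (min of an empty set of sums).
def Pre_minimizeTheDifference (mat : List (List Int)) (target : Int) : Prop :=
  ∀ row ∈ mat, row ≠ []

instance (mat : List (List Int)) (target : Int) : Decidable (Pre_minimizeTheDifference mat target) := by
  unfold Pre_minimizeTheDifference; infer_instance

def pvWitness_minimizeTheDifference : List (List Int) × Int := ([[1, 2], [3, 5]], 4)

def Spec_minimizeTheDifference (mat : List (List Int)) (target : Int) (out : Int) : Prop := out = minimizeTheDifference_alt mat target
instance (mat : List (List Int)) (target : Int) (out : Int) : Decidable (Spec_minimizeTheDifference mat target out) := by unfold Spec_minimizeTheDifference; infer_instance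

-- ===== CLAIM (what is proved, stated in full; the proofs are below) =====
def Claim_equal_minimizeTheDifference : Prop := ∀ (mat : List (List Int)) (target : Int), Dom_minimizeTheDifference mat target → Pre_minimizeTheDifference mat target → Spec_minimizeTheDifference mat target (minimizeTheDifference mat target)

-- ===== LEMMAS AND PROOFS =====

-- the multiset of sums reachable from sm by picking one element per remaining row
def reach : List (List Int) → Int → List Int
  | [], sm => [sm]
  | row :: rest, sm => row.flatMap (fun x => reach rest (sm + x))

-- running minimum of a list, none = empty
def myMin (l : List Int) : Option Int := l.foldl (fun r x => optMin r (some x)) none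

theorem optMin_assoc (a b c : Option Int) : optMin (optMin a b) c = optMin a (optMin b c) := by
  cases a <;> cases b <;> cases c <;> simp [optMin, min_assoc]

theorem optMin_none_right (a : Option Int) : optMin a none = a := by
  cases a <;> simp [optMin]

theorem myMin_foldl_general (l : List Int) (init : Option Int) :
    l.foldl (fun r x => optMin r (some x)) init = optMin init (myMin l) := by
  induction l generalizing init with
  | nil => simp [myMin, optMin_none_right]
  | cons a t ih =>
    simp only [myMin, List.foldl_cons] at *
    rw [ih (optMin init (some a)), ih (optMin none (some a)), optMin_assoc]
    rfl

theorem myMin_append (a b : List Int) : myMin (a ++ b) = optMin (myMin a) (myMin b) := by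
  unfold myMin
  rw [List.foldl_append, myMin_foldl_general]
  rfl

theorem myMin_eq_none_iff (l : List Int) : myMin l = none ↔ l = [] := by
  cases l with
  | nil => simp [myMin]
  | cons a t =>
    simp only [myMin, List.foldl_cons]
    rw [show optMin none (some a) = some a from rfl, myMin_foldl_general]
    constructor
    · intro h; cases hm : myMin t <;> simp [optMin, hm] at h
    · intro h; exact absurd h (by simp)

theorem myMin_mem {l : List Int} {m : Int} (h : myMin l = some m) : m ∈ l := by
  induction l generalizing m with
  | nil => simp [myMin] at h
  | cons a t ih =>
    simp only [myMin, List.foldl_cons] at h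
    rw [show optMin none (some a) = some a from rfl, myMin_foldl_general] at h
    cases hm : myMin t with
    | none => rw [hm, optMin_none_right] at h; cases h; simp
    | some b =>
      rw [hm] at h
      simp only [optMin, Option.some.injEq] at h
      have : m = a ∨ m = b := by rcases min_cases a b with ⟨he, _⟩ | ⟨he, _⟩ <;> omega
      rcases this with rfl | rfl
      · simp
      · exact List.mem_cons_of_mem a (ih hm)

theorem myMin_isMin {l : List Int} {m : Int} (h : myMin l = some m) : ∀ y ∈ l, m ≤ y := by
  induction l generalizing m with
  | nil => simp
  | cons a t ih =>
    simp only [myMin, List.foldl_cons] at h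
    rw [show optMin none (some a) = some a from rfl, myMin_foldl_general] at h
    intro y hy
    cases hm : myMin t with
    | none =>
      rw [hm, optMin_none_right] at h
      rw [(myMin_eq_none_iff t).mp hm] at hy
      cases h
      simp at hy
      omega
    | some b =>
      rw [hm] at h
      simp only [optMin, Option.some.injEq] at h
      rcases List.mem_cons.mp hy with rfl | hy
      · omega
      · have h1 := ih hm y hy
        have := min_le_right a b
        omega

-- values of myMin over a list of absolute differences are nonneg
theorem myMin_abs_nonneg {target : Int} {l : List Int} {m : Int}
    (h : myMin (l.map (fun s => |s - target|)) = some m) : 0 ≤ m := by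
  have hm := myMin_mem h
  simp only [List.mem_map] at hm
  obtain ⟨s, _, rfl⟩ := hm
  exact abs_nonneg _

theorem myMin_flatMap (h : Int → List Int) (l : List Int) :
    myMin (l.flatMap h) = l.foldl (fun r x => optMin r (myMin (h x))) none := by
  suffices H : ∀ init, l.foldl (fun r x => optMin r (myMin (h x))) init = optMin init (myMin (l.flatMap h)) by
    rw [H none]; rfl
  induction l with
  | nil => intro init; simp [myMin, optMin_none_right]
  | cons a t ih =>
    intro init
    simp only [List.foldl_cons, ih, List.flatMap_cons, myMin_append, optMin_assoc]

-- removing the break: given all G-values nonneg (or none), the guarded fold equals the plain fold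
theorem fold_break_eq (G : Int → Option Int)
    (hG : ∀ x m, G x = some m → 0 ≤ m) (row : List Int) (res : Option Int)
    (hres : ∀ m, res = some m → 0 ≤ m) :
    row.foldl (fun r x => if r = some 0 then r else optMin r (G x)) res
      = row.foldl (fun r x => optMin r (G x)) res := by
  induction row generalizing res with
  | nil => rfl
  | cons a t ih =>
    simp only [List.foldl_cons]
    by_cases h0 : res = some 0
    · subst h0
      have hstep : optMin (some 0) (G a) = some 0 := by
        cases hg : G a with
        | none => rfl
        | some c =>
          have := hG a c hg
          simp only [optMin, Option.some.injEq]
          omega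
      rw [if_pos rfl, hstep]
      exact ih (some 0) (by intro m hm; cases hm; omega)
    · rw [if_neg h0]
      refine ih _ ?_
      intro m hm
      cases hr : res with
      | none => rw [hr] at hm; exact hG a m hm
      | some b =>
        rw [hr] at hm
        cases hg : G a with
        | none => rw [hg, optMin_none_right] at hm; cases hm; exact hres _ hr
        | some c =>
          rw [hg] at hm
          simp only [optMin, Option.some.injEq] at hm
          have h1 := hres b hr
          have h2 := hG a c hg
          have := min_le_left b c
          omega

-- A's dp computes the minimum of |s - target| over the reachable sums
theorem dpA_eq_reach (target : Int) (rows : List (List Int)) (sm : Int) :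
    dpA target rows sm = myMin ((reach rows sm).map (fun s => |s - target|)) := by
  induction rows generalizing sm with
  | nil => rfl
  | cons row rest ih =>
    simp only [dpA, reach]
    simp only [ih]
    rw [fold_break_eq _ (fun x m hm => myMin_abs_nonneg hm) row none (by simp)]
    rw [List.map_flatMap, myMin_flatMap]

theorem reach_ne_nil {rows : List (List Int)} (h : ∀ r ∈ rows, r ≠ []) (sm : Int) :
    reach rows sm ≠ [] := by
  induction rows generalizing sm with
  | nil => simp [reach]
  | cons row rest ih =>
    simp only [reach]
    intro hc
    rcases List.exists_mem_of_ne_nil row (h row (by simp)) with ⟨x, hx⟩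
    have := List.flatMap_eq_nil_iff.mp hc x hx
    exact ih (fun r hr => h r (by simp [hr])) (sm + x) this

theorem mem_reach_map_ofList (rows : List (List Int)) (sm y : Int) :
    y ∈ reach (rows.map (fun r => PySem.Set.ofList r)) sm ↔ y ∈ reach rows sm := by
  induction rows generalizing sm with
  | nil => simp [reach]
  | cons row rest ih =>
    simp only [List.map_cons, reach, List.mem_flatMap, PySem.Set.mem_ofList]
    constructor
    · rintro ⟨x, hx, hy⟩; exact ⟨x, hx, (ih _).mp hy⟩
    · rintro ⟨x, hx, hy⟩; exact ⟨x, hx, (ih _).mpr hy⟩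

-- membership in B's folded set of sums
theorem mem_foldl_sums (rows : List (List Int)) (s0 : List Int) (y : Int) :
    y ∈ rows.foldl
        (fun sums row =>
          PySem.Set.ofList (sums.flatMap (fun s => (PySem.Set.ofList row).map (fun x => s + x)))) s0
      ↔ ∃ a ∈ s0, y ∈ reach rows a := by
  induction rows generalizing s0 with
  | nil => simp [reach]
  | cons row rest ih =>
    simp only [List.foldl_cons, ih, reach]
    constructor
    · rintro ⟨a, ha, hy⟩
      rw [PySem.Set.mem_ofList] at ha
      simp only [List.mem_flatMap, List.mem_map, PySem.Set.mem_ofList] at ha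
      obtain ⟨s, hs, x, hx, rfl⟩ := ha
      exact ⟨s, hs, List.mem_flatMap.mpr ⟨x, hx, hy⟩⟩
    · rintro ⟨a, ha, hy⟩
      rw [List.mem_flatMap] at hy
      obtain ⟨x, hx, hy⟩ := hy
      refine ⟨a + x, ?_, hy⟩
      rw [PySem.Set.mem_ofList]
      simp only [List.mem_flatMap, List.mem_map, PySem.Set.mem_ofList]
      exact ⟨a, ha, x, hx, rfl⟩

-- ===== VERDICT (by name: the statement is the Claim_ definition above) =====
theorem minimizeTheDifference_spec : Claim_equal_minimizeTheDifference := by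
  intro mat target _ hpre
  unfold Spec_minimizeTheDifference minimizeTheDifference minimizeTheDifference_alt
  -- characterise both sides via membership in reach mat 0
  set sums := mat.foldl
    (fun sums row =>
      PySem.Set.ofList (sums.flatMap (fun s => (PySem.Set.ofList row).map (fun x => s + x))))
    (PySem.Set.ofList [0]) with hsums
  -- A side
  rw [dpA_eq_reach]
  have hmemA : ∀ y, y ∈ reach (mat.map (fun r => PySem.Set.ofList r)) 0 ↔ y ∈ reach mat 0 :=
    fun y => mem_reach_map_ofList mat 0 y
  have hA_ne : reach (mat.map (fun r => PySem.Set.ofList r)) 0 ≠ [] := by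
    apply reach_ne_nil
    intro r hr
    simp only [List.mem_map] at hr
    obtain ⟨r0, hr0, rfl⟩ := hr
    rcases List.exists_mem_of_ne_nil r0 (hpre r0 hr0) with ⟨x, hx⟩
    intro hc
    rw [← PySem.Set.mem_ofList] at hx
    simp [hc] at hx
  -- the A-side minimum exists
  obtain ⟨mA, hmA⟩ : ∃ m, myMin ((reach (mat.map (fun r => PySem.Set.ofList r)) 0).map (fun s => |s - target|)) = some m := by
    cases hm : myMin ((reach (mat.map (fun r => PySem.Set.ofList r)) 0).map (fun s => |s - target|)) with
    | none =>
      rw [myMin_eq_none_iff, List.map_eq_nil_iff] at hm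
      exact absurd hm hA_ne
    | some m => exact ⟨m, rfl⟩
  rw [hmA]
  -- B side: sums is nonempty and has the same members as reach mat 0
  have hmemB : ∀ y, y ∈ sums ↔ y ∈ reach mat 0 := by
    intro y
    rw [hsums, mem_foldl_sums]
    constructor
    · rintro ⟨a, ha, hy⟩
      have : a = 0 := by simpa [PySem.Set.ofList] using ha
      exact this ▸ hy
    · intro hy
      exact ⟨0, by simp [PySem.Set.ofList], hy⟩
  have hB_ne : sums ≠ [] := by
    rcases List.exists_mem_of_ne_nil _ (reach_ne_nil (fun r hr => hpre r hr) 0) with ⟨y, hy⟩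
    intro hc
    have := (hmemB y).mpr hy
    simp [hc] at this
  obtain ⟨mB, hmB⟩ : ∃ m, PySem.List.min? (sums.map (fun s => |s - target|)) (fun y => y) = some m := by
    cases hm : PySem.List.min? (sums.map (fun s => |s - target|)) (fun y => y) with
    | none =>
      rw [PySem.List.min?_eq_none_iff, List.map_eq_nil_iff] at hm
      exact absurd hm hB_ne
    | some m => exact ⟨m, rfl⟩
  simp only [hmB, Option.getD_some]
  -- both are the minimum of the same set of values
  have hAmem : mA ∈ (reach mat 0).map (fun s => |s - target|) := by
    have := myMin_mem hmA
    simp only [List.mem_map] at this ⊢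
    obtain ⟨s, hs, rfl⟩ := this
    exact ⟨s, (hmemA s).mp hs, rfl⟩
  have hBmem : mB ∈ (reach mat 0).map (fun s => |s - target|) := by
    have := PySem.List.min?_mem hmB
    simp only [List.mem_map] at this ⊢
    obtain ⟨s, hs, rfl⟩ := this
    exact ⟨s, (hmemB s).mp hs, rfl⟩
  have hAle : ∀ y ∈ (reach mat 0).map (fun s => |s - target|), mA ≤ y := by
    intro y hy
    apply myMin_isMin hmA
    simp only [List.mem_map] at hy ⊢
    obtain ⟨s, hs, rfl⟩ := hy
    exact ⟨s, (hmemA s).mpr hs, rfl⟩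
  have hBle : ∀ y ∈ (reach mat 0).map (fun s => |s - target|), mB ≤ y := by
    intro y hy
    have := PySem.List.min?_isMin hmB
    simp only [List.mem_map] at hy
    obtain ⟨s, hs, rfl⟩ := hy
    have hmem : |s - target| ∈ sums.map (fun s => |s - target|) := by
      simp only [List.mem_map]
      exact ⟨s, (hmemB s).mpr hs, rfl⟩
    exact this _ hmem
  exact le_antisymm (hAle mB hBmem) (hBle mA hAmem)
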